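-- pv_equiv track=rewrite | github.com/r5by/montgomery-ecc | mecc/utils.py | int_by_slider
-- ===== SOURCE A (Python) =====
-- def int_by_slider(n: int, d: int, i: int) -> int:
--     ''' From the position {i}, slide the given integer {n} by {d}-steps and take out the bit
--         to form a new integer
--         e.g.
--             >>> n = 1457
--             >>> x = int_by_slider(n, d=4, i=0)  # x=1
--             >>> y = int_by_slider(n, d=3, i=1)  # y=14
--     '''
--     index = 0
--     n >>= i
--     r = 0
--     while n > 0:
--         b = n & 1
--         r |= (b << index)
--
--         n >>= d
--         index += 1
--     return r
-- ===== SOURCE B (Python) =====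
-- def int_by_slider(n: int, d: int, i: int) -> int:
--     '''Pick every d-th bit of n >> i via a binary-string slice by stride d.'''
--     m = n >> i
--     if m <= 0:
--         return 0
--     s = bin(m)[2:][::-1]          # LSB-first bit string
--     return int(s[::d][::-1], 2)   # every d-th bit, rebuilt MSB-first
-- ===== Notes on version B (the rewrite author's own statement) =====
-- stated objective: idiomatic
-- what changed: Replaces the index-maintaining while-shift loop with a string-representation pipeline: take bin(n>>i), reverse to LSB-first, slice every d-th character with s[::d], and parse the reversed sample back with int(_,2).
import Mathlib
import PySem

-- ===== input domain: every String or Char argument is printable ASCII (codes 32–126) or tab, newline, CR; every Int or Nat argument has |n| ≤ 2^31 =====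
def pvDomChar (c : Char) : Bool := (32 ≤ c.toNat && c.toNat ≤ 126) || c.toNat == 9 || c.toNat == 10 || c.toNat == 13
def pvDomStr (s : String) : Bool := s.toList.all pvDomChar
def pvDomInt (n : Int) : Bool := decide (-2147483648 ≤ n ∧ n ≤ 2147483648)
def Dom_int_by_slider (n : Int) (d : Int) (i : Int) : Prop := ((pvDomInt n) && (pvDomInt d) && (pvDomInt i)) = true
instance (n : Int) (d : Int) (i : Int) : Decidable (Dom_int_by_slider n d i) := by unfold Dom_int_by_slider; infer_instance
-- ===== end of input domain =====

-- B replaces A's index-maintaining while-shift loop by a binary-string pipeline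
-- (LSB-first bit string, stride-d slice, parse back); objective: idiomatic, no speed claim.


-- ===== PORT A =====
-- while n > 0: b = n & 1; r |= b << index; n >>= d; index += 1
-- (fuel-bounded; inside Pre_ the fuel n+1 is never exhausted since n >>= d with d ≥ 1 strictly shrinks n)
def pvLoopA (fuel : Nat) (n : Int) (d : Int) (index : Nat) (r : Int) : Int :=
  match fuel with
  | 0 => r
  | fuel + 1 =>
    if 0 < n then
      pvLoopA fuel (n >>> d.toNat) d (index + 1) (PySem.Int.bor r ((PySem.Int.band n 1) <<< index))
    else r

def int_by_slider (n : Int) (d : Int) (i : Int) : Int :=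
  -- n >>= i  (i < 0 raises in Python: excluded by Pre_); then the while loop
  pvLoopA ((n >>> i.toNat).toNat + 1) (n >>> i.toNat) d 0 0

-- ===== PORT B =====
def pvBinLSB : Nat → List Char
  | 0 => []
  | m + 1 => (if (m + 1) % 2 = 1 then '1' else '0') :: pvBinLSB ((m + 1) / 2)
  termination_by m => m
  decreasing_by omega

def pvBin (m : Nat) : List Char := (pvBinLSB m).reverse   -- bin(m)[2:], MSB-first

-- s[::d] for stride d ≥ 1, called with k = d - 1
def pvEveryStep (k : Nat) : List Char → List Char
  | [] => []
  | c :: cs => c :: pvEveryStep k (cs.drop k)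
  termination_by l => l.length
  decreasing_by simp

-- int(s, 2) for a '0'/'1' string
def pvParseBin (s : List Char) : Nat :=
  s.foldl (fun acc c => 2 * acc + (if c = '1' then 1 else 0)) 0

-- s[::d], hand-ported Python slice semantics for step d ≠ 0: positive step takes every d-th
-- char from the front, negative step every |d|-th from the back (exact; d = 0 raises in Python,
-- where B raises too, so the value returned there is irrelevant)
def pvStride (d : Int) (s : List Char) : List Char :=
  if d < 0 then pvEveryStep (d.natAbs - 1) s.reverse else pvEveryStep (d.toNat - 1) s

def int_by_slider_alt (n : Int) (d : Int) (i : Int) : Int :=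
  if n >>> i.toNat ≤ 0 then 0                         -- m = n >> i; m <= 0
  else                                                -- s = bin(m)[2:][::-1]; int(s[::d][::-1], 2)
    ((pvParseBin (pvStride d ((pvBin (n >>> i.toNat).toNat).reverse)).reverse : Nat) : Int)

-- ===== PRECONDITION & SPEC =====
-- Pre_ excludes exactly where Python A does not return: i < 0 (ValueError on n >>= i), and
-- d ≤ 0 with n >> i > 0 (ValueError on n >>= d for d < 0, infinite loop for d = 0).
def Pre_int_by_slider (n : Int) (d : Int) (i : Int) : Prop :=
  0 ≤ i ∧ (1 ≤ d ∨ n >>> i.toNat ≤ 0)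
instance (n : Int) (d : Int) (i : Int) : Decidable (Pre_int_by_slider n d i) := by
  unfold Pre_int_by_slider; infer_instance

def pvWitness_int_by_slider : Int × Int × Int := (1457, 3, 1)

def Spec_int_by_slider (n : Int) (d : Int) (i : Int) (out : Int) : Prop := out = int_by_slider_alt n d i
instance (n : Int) (d : Int) (i : Int) (out : Int) : Decidable (Spec_int_by_slider n d i out) := by unfold Spec_int_by_slider; infer_instance

-- ===== CLAIM (what is proved, stated in full; the proofs are below) =====
def Claim_equal_int_by_slider : Prop := ∀ (n : Int) (d : Int) (i : Int), Dom_int_by_slider n d i → Pre_int_by_slider n d i → Spec_int_by_slider n d i (int_by_slider n d i)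

-- ===== LEMMAS AND PROOFS =====

-- reference recursion both ports are reduced to: every d-th bit of m, LSB first
def pvG (fuel : Nat) (m : Nat) (k : Nat) : Nat :=
  match fuel with
  | 0 => 0
  | fuel + 1 => if m = 0 then 0 else m % 2 + 2 * pvG fuel (m >>> k) k

-- A side: the loop accumulates pvG into r at bit position index
lemma pvLoopA_eq_pvG (fuel : Nat) : ∀ (m : Nat) (d : Int) (index r : Nat), r < 2 ^ index →
    pvLoopA fuel (m : Int) d index (r : Int) = ((r + pvG fuel m d.toNat * 2 ^ index : Nat) : Int) := by
  induction fuel with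
  | zero => intro m d index r _; simp [pvLoopA, pvG]
  | succ fuel ih =>
    intro m d index r hr
    by_cases hm : m = 0
    · subst hm; simp [pvLoopA, pvG]
    · have hmpos : 0 < (m : Int) := by exact_mod_cast Nat.pos_of_ne_zero hm
      rw [pvLoopA, if_pos hmpos, pvG, if_neg hm]
      have hband : PySem.Int.band (m : Int) 1 = ((m % 2 : Nat) : Int) := by
        rw [show (1 : Int) = ((1 : Nat) : Int) from rfl, PySem.Int.band_natCast,
          Nat.and_one_is_mod]
      rw [hband]
      simp only [← Int.natCast_shiftRight, ← Int.natCast_shiftLeft, PySem.Int.bor_natCast]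
      have hbit : r ||| (m % 2) <<< index = r + m % 2 * 2 ^ index := by
        rcases Nat.mod_two_eq_zero_or_one m with h | h <;> rw [h]
        · simp
        · have h2 := Nat.two_pow_add_eq_or_of_lt hr 1
          rw [mul_one] at h2
          rw [Nat.shiftLeft_eq, Nat.lor_comm, one_mul]
          omega
      rw [hbit, ih (m >>> d.toNat) d (index + 1) (r + m % 2 * 2 ^ index)
        (by rcases Nat.mod_two_eq_zero_or_one m with h | h <;> rw [h, pow_succ] <;> omega)]
      congr 1
      rw [pow_succ]; ring

-- dropping k chars of the LSB-first bit string is shifting right by k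
lemma pvBinLSB_drop_one (m : Nat) : (pvBinLSB m).drop 1 = pvBinLSB (m / 2) := by
  match m with
  | 0 => simp [pvBinLSB]
  | m + 1 => rw [pvBinLSB]; simp

lemma pvBinLSB_drop (k : Nat) : ∀ (m : Nat), (pvBinLSB m).drop k = pvBinLSB (m >>> k) := by
  induction k with
  | zero => intro m; simp
  | succ k ih =>
    intro m
    have h1 : (pvBinLSB m).drop (k + 1) = ((pvBinLSB m).drop k).drop 1 := by
      rw [List.drop_drop]
    rw [h1, ih, pvBinLSB_drop_one, ← Nat.shiftRight_succ]

lemma pvEveryStep_nil (k : Nat) : pvEveryStep k [] = [] := by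
  rw [pvEveryStep.eq_def]

lemma pvEveryStep_cons (k : Nat) (c : Char) (cs : List Char) :
    pvEveryStep k (c :: cs) = c :: pvEveryStep k (cs.drop k) := by
  rw [pvEveryStep.eq_def]

-- value of an LSB-first bit string, as Source B computes it (reverse then int(_, 2))
def pvValLSB (l : List Char) : Nat := pvParseBin l.reverse

lemma pvValLSB_cons (c : Char) (cs : List Char) :
    pvValLSB (c :: cs) = 2 * pvValLSB cs + (if c = '1' then 1 else 0) := by
  simp [pvValLSB, pvParseBin, List.foldl_append]

-- B side equals the reference recursion
lemma pvValLSB_everyStep_eq_pvG (fuel : Nat) : ∀ (m k : Nat), 1 ≤ k → m < fuel →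
    pvValLSB (pvEveryStep (k - 1) (pvBinLSB m)) = pvG fuel m k := by
  induction fuel with
  | zero => intro m k _ h; omega
  | succ fuel ih =>
    intro m k hk hm
    match m with
    | 0 => simp [pvBinLSB, pvEveryStep_nil, pvValLSB, pvParseBin, pvG]
    | m + 1 =>
      rw [pvG, if_neg (by omega), pvBinLSB, pvEveryStep_cons, pvValLSB_cons,
        pvBinLSB_drop (k - 1) ((m + 1) / 2)]
      have hsh : ((m + 1) / 2) >>> (k - 1) = (m + 1) >>> k := by
        rw [Nat.shiftRight_eq_div_pow, Nat.shiftRight_eq_div_pow, Nat.div_div_eq_div_mul]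
        congr 1
        rw [← pow_succ']
        congr 1
        omega
      rw [hsh, ih ((m + 1) >>> k) k hk
        (by
          have h2 : (m + 1) >>> k < m + 1 := by
            rw [Nat.shiftRight_eq_div_pow]
            exact Nat.div_lt_self (by omega) (Nat.one_lt_two_pow (by omega))
          omega)]
      have : (if (m + 1) % 2 = 1 then '1' else '0') = '1' ↔ (m + 1) % 2 = 1 := by
        split <;> simp_all
      rcases Nat.mod_two_eq_zero_or_one (m + 1) with h | h <;> simp [h]; omega

-- ===== VERDICT (by name: the statement is the Claim_ definition above) =====
theorem int_by_slider_spec : Claim_equal_int_by_slider := by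
  intro n d i _ hpre
  obtain ⟨hi, hpre2⟩ := hpre
  unfold Spec_int_by_slider int_by_slider int_by_slider_alt
  by_cases hle : n >>> i.toNat ≤ 0
  · rw [if_pos hle, show (n >>> i.toNat).toNat = 0 by omega]
    simp [pvLoopA, show ¬(0 < n >>> i.toNat) by omega]
  · have hlt : (0 : Int) < n >>> i.toNat := by omega
    have hd : 1 ≤ d := by
      rcases hpre2 with h | h
      · exact h
      · omega
    rw [if_neg hle]
    obtain ⟨mN, hmN⟩ : ∃ mN : Nat, n >>> i.toNat = (mN : Int) :=
      ⟨(n >>> i.toNat).toNat, (Int.toNat_of_nonneg (by omega)).symm⟩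
    rw [hmN, show (0 : Int) = ((0 : Nat) : Int) from rfl, Int.toNat_natCast,
      pvLoopA_eq_pvG (mN + 1) mN d 0 0 (by norm_num)]
    simp only [pvBin, List.reverse_reverse, pvStride, if_neg (show ¬ d < 0 by omega)]
    rw [show pvParseBin (pvEveryStep (d.toNat - 1) (pvBinLSB mN)).reverse
        = pvValLSB (pvEveryStep (d.toNat - 1) (pvBinLSB mN)) from rfl,
      pvValLSB_everyStep_eq_pvG (mN + 1) mN d.toNat (by omega) (by omega)]
    simp
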